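-- pv_equiv track=rewrite | github.com/Harshith-19/Student-Registration-Portal | Cardgame/cardgame.py | cardchoice2
-- ===== SOURCE A (Python) =====
-- def cardchoice2(a,b,bot):
--     flag=0
--     for i in bot:
--         if(a[1]==i[1] and i[0]>a[0] and i[0]>b[0]):
--
--            b=i
--            flag=1
--            break
--
--         elif(a[1]==i[1]):
--             for i in range(len(bot)-1,-1,-1):
--                 if(a[1]==bot[i][1]):
--                    b=bot[i]
--                    flag=1
--                    break
--             if(flag==1):
--                 break
--     if(flag!=1):
--         b=bot[-1]
--     return b
-- ===== SOURCE B (Python) =====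
-- def cardchoice2(a, b, bot):
--     matches = [c for c in bot if c[1] == a[1]]
--     if not matches:
--         return bot[-1]
--     first = matches[0]
--     if first[0] > a[0] and first[0] > b[0]:
--         return first
--     return matches[-1]
-- ===== Notes on version B (the rewrite author's own statement) =====
-- stated objective: simpler
-- what changed: Replaces the flag sentinel, the nested reversed index scan and the break-out-of-two-loops control flow by one filter of same-suit cards followed by plain first/last selection.
import Mathlib
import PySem

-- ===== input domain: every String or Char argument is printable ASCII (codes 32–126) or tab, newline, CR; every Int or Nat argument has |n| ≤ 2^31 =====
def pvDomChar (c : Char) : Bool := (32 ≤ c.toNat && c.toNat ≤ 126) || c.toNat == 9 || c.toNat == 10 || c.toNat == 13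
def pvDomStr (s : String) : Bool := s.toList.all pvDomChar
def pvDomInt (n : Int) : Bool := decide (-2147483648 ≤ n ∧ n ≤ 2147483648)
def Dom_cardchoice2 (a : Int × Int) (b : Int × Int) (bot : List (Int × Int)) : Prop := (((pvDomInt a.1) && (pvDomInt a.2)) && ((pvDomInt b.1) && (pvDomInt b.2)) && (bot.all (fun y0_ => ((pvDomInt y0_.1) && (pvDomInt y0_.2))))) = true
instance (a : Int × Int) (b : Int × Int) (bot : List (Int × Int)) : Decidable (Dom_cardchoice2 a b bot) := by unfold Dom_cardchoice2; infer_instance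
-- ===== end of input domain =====

-- B replaces A's flag sentinel, nested reversed index scan and double-break control flow
-- by one filter of same-suit cards plus first/last selection (objective: simpler).

-- ===== PORT A =====
-- inner loop: 'for i in range(len(bot)-1,-1,-1): if a[1]==bot[i][1]: b=bot[i]; flag=1; break'
def cardchoice2Inner (a : Int × Int) (bot : List (Int × Int)) : List Int → Option (Int × Int)
  | [] => none
  | j :: rest =>
    match PySem.List.pyGet? bot j with
    | some c => if a.2 = c.2 then some c else cardchoice2Inner a bot rest
    | none => cardchoice2Inner a bot rest   -- unreachable: range indices are in range

-- outer loop; 'some c' means the loop set b := c with flag = 1 and broke out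
def cardchoice2Outer (a b : Int × Int) (bot : List (Int × Int)) : List (Int × Int) → Option (Int × Int)
  | [] => none
  | i :: rest =>
    if a.2 = i.2 ∧ i.1 > a.1 ∧ i.1 > b.1 then some i
    else if a.2 = i.2 then
      match cardchoice2Inner a bot (PySem.List.pyRange ((bot.length : Int) - 1) (-1) (-1)) with
      | some c => some c                    -- flag == 1 after inner loop: break
      | none => cardchoice2Outer a b bot rest  -- flag still 0: continue outer loop
    else cardchoice2Outer a b bot rest

def cardchoice2 (a : Int × Int) (b : Int × Int) (bot : List (Int × Int)) : Int × Int :=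
  match cardchoice2Outer a b bot bot with
  | some c => c
  | none => (PySem.List.pyGet? bot (-1)).getD (0, 0)   -- bot[-1]; IndexError on [] is excluded by Pre_

-- ===== PORT B =====
def cardchoice2_alt (a : Int × Int) (b : Int × Int) (bot : List (Int × Int)) : Int × Int :=
  let ms := bot.filter (fun c => c.2 == a.2)           -- matches = [c for c in bot if c[1] == a[1]]
  match ms with
  | [] => (PySem.List.pyGet? bot (-1)).getD (0, 0)     -- bot[-1]; IndexError on [] is excluded by Pre_
  | first :: _ =>
    if first.1 > a.1 ∧ first.1 > b.1 then first
    else ms.getLast?.getD (0, 0)                       -- matches ≠ [], so getLast? is some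

-- ===== PRECONDITION & SPEC =====
-- Pre_ excludes only bot = [], on which A raises IndexError at bot[-1].
def Pre_cardchoice2 (a : Int × Int) (b : Int × Int) (bot : List (Int × Int)) : Prop := bot ≠ []
instance (a : Int × Int) (b : Int × Int) (bot : List (Int × Int)) : Decidable (Pre_cardchoice2 a b bot) := by unfold Pre_cardchoice2; infer_instance
def pvWitness_cardchoice2 : (Int × Int) × (Int × Int) × (List (Int × Int)) := ((3, 1), (5, 0), [(2, 0), (4, 1), (7, 1)])

def Spec_cardchoice2 (a : Int × Int) (b : Int × Int) (bot : List (Int × Int)) (out : Int × Int) : Prop := out = cardchoice2_alt a b bot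
instance (a : Int × Int) (b : Int × Int) (bot : List (Int × Int)) (out : Int × Int) : Decidable (Spec_cardchoice2 a b bot out) := by unfold Spec_cardchoice2; infer_instance

-- ===== CLAIM (what is proved, stated in full; the proofs are below) =====
def Claim_equal_cardchoice2 : Prop := ∀ (a : Int × Int) (b : Int × Int) (bot : List (Int × Int)), Dom_cardchoice2 a b bot → Pre_cardchoice2 a b bot → Spec_cardchoice2 a b bot (cardchoice2 a b bot)

-- ===== LEMMAS AND PROOFS =====

-- find? = head of filter
theorem pv_find?_eq_head_filter {α : Type} (p : α → Bool) (l : List α) :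
    l.find? p = (l.filter p).head? := by
  induction l with
  | nil => rfl
  | cons x xs ih =>
    by_cases h : p x
    · rw [List.find?_cons_of_pos h, List.filter_cons_of_pos h, List.head?]
    · rw [List.find?_cons_of_neg h, List.filter_cons_of_neg h, ih]

-- the inner scan over indices [n-1, …, 0] of (ys ++ zs) with n = ys.length:
-- peeling one element off the right of ys
theorem pv_inner_concat (a : Int × Int) (bot : List (Int × Int)) (ys : List (Int × Int)) (c : Int × Int)
    (hpre : ∀ j : Int, 0 ≤ j → j < ((ys.length : Int) + 1) →
      PySem.List.pyGet? bot j = (ys ++ [c])[j.toNat]?) :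
    cardchoice2Inner a bot (PySem.List.pyRange ((ys.length : Int) + 1 - 1) (-1) (-1)) =
      (if a.2 = c.2 then some c
       else cardchoice2Inner a bot (PySem.List.pyRange ((ys.length : Int) - 1) (-1) (-1))) := by
  have hcons : PySem.List.pyRange ((ys.length : Int) + 1 - 1) (-1) (-1) =
      ((ys.length : Int)) :: PySem.List.pyRange ((ys.length : Int) - 1) (-1) (-1) := by
    have := PySem.List.pyRange_neg_one_cons (a := ((ys.length : Int))) (b := (-1)) (by omega)
    simpa using this
  rw [hcons]
  have hget : PySem.List.pyGet? bot ((ys.length : Int)) = some c := by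
    rw [hpre _ (by positivity) (by omega)]
    simp
  simp [cardchoice2Inner, hget]

-- the inner scan returns the last suit match of bot (phrased as first match of the reverse)
theorem pv_inner_eq_find_rev (a : Int × Int) (bot : List (Int × Int)) :
    ∀ (ys : List (Int × Int)),
      (∀ j : Int, 0 ≤ j → j < (ys.length : Int) → PySem.List.pyGet? bot j = ys[j.toNat]?) →
      cardchoice2Inner a bot (PySem.List.pyRange ((ys.length : Int) - 1) (-1) (-1)) =
        ys.reverse.find? (fun c => a.2 == c.2) := by
  intro ys
  induction ys using List.reverseRecOn with
  | nil =>
    intro _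
    have : PySem.List.pyRange (-1 : Int) (-1) (-1) = [] := PySem.List.pyRange_neg_one_eq_nil le_rfl
    simp [this, cardchoice2Inner]
  | append_singleton ys c ih =>
    intro hpre
    have hlen : ((ys ++ [c]).length : Int) = (ys.length : Int) + 1 := by simp
    rw [hlen, pv_inner_concat a bot ys c (by intro j h0 hj; rw [hpre j h0 (by omega)])]
    by_cases hc : a.2 = c.2
    · simp [hc]
    · rw [ih (by
        intro j h0 hj
        rw [hpre j h0 (by omega)]
        rw [List.getElem?_append_left (by omega)])]
      simp [hc]

-- characterisation of the outer loop on any sublist l of bot whose elements are all in bot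
theorem pv_outer_char (a b : Int × Int) (bot : List (Int × Int))
    (hbot : ∀ j : Int, 0 ≤ j → j < (bot.length : Int) → PySem.List.pyGet? bot j = bot[j.toNat]?) :
    ∀ (l : List (Int × Int)), (∀ x ∈ l, x ∈ bot) →
      cardchoice2Outer a b bot l =
        match l.find? (fun c => a.2 == c.2) with
        | none => none
        | some f =>
          if f.1 > a.1 ∧ f.1 > b.1 then some f
          else bot.reverse.find? (fun c => a.2 == c.2) := by
  intro l
  induction l with
  | nil => intro _; simp [cardchoice2Outer]
  | cons i rest ih =>
    intro hsub
    by_cases hsuit : a.2 = i.2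
    · by_cases hbeat : i.1 > a.1 ∧ i.1 > b.1
      · simp [cardchoice2Outer, hsuit, hbeat, List.find?]
      · have hinner : cardchoice2Inner a bot (PySem.List.pyRange ((bot.length : Int) - 1) (-1) (-1)) =
            bot.reverse.find? (fun c => a.2 == c.2) := pv_inner_eq_find_rev a bot bot hbot
        have hmem : i ∈ bot.reverse := by simp [hsub i (by simp)]
        have hpi : (fun c : Int × Int => a.2 == c.2) i = true := by simp [hsuit]
        have hsome : ∃ f, bot.reverse.find? (fun c => a.2 == c.2) = some f :=
          Option.isSome_iff_exists.mp (List.find?_isSome.mpr ⟨i, hmem, hpi⟩)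
        rcases hsome with ⟨f, hf⟩
        have hfind : List.find? (fun c => a.2 == c.2) (i :: rest) = some i := by
          simp [List.find?, hsuit]
        simp only [cardchoice2Outer, hfind]
        rw [if_neg (by tauto), if_pos hsuit, hinner, hf]
        simp [hbeat]
    · have : ((fun c => a.2 == c.2) i) = false := by simp [hsuit]
      simp [cardchoice2Outer, hsuit, List.find?, this]
      exact ih (fun x hx => hsub x (by simp [hx]))

-- pyGet? with a nonnegative in-range index is getElem?
theorem pv_pyGet?_nonneg (bot : List (Int × Int)) :
    ∀ j : Int, 0 ≤ j → j < (bot.length : Int) → PySem.List.pyGet? bot j = bot[j.toNat]? := by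
  intro j h0 hj
  obtain ⟨k, rfl⟩ : ∃ k : Nat, j = (k : Int) := ⟨j.toNat, by omega⟩
  simp

-- ===== VERDICT (by name: the statement is the Claim_ definition above) =====
theorem cardchoice2_spec : Claim_equal_cardchoice2 := by
  intro a b bot _ hpre
  unfold Spec_cardchoice2 cardchoice2 cardchoice2_alt
  have hpred : (fun c : Int × Int => c.2 == a.2) = (fun c : Int × Int => a.2 == c.2) := by
    funext c; simp [eq_comm]
  rw [pv_outer_char a b bot (pv_pyGet?_nonneg bot) bot (fun x hx => hx)]
  rw [pv_find?_eq_head_filter]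
  simp only [hpred]
  cases hm : bot.filter (fun c => a.2 == c.2) with
  | nil => simp
  | cons f ms =>
    have hrev : bot.reverse.find? (fun c => a.2 == c.2) = some ((f :: ms).getLast?.getD (0, 0)) := by
      rw [pv_find?_eq_head_filter, List.filter_reverse, hm, List.head?_reverse]
      cases hlast : (f :: ms).getLast? with
      | none => simp at hlast
      | some x => simp [hlast]
    simp only [List.head?]
    by_cases hbeat : f.1 > a.1 ∧ f.1 > b.1
    · simp [hbeat]
    · simp [hbeat, hrev]
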